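-- pv_equiv track=rewrite | github.com/ArdeleanLucas/PARSE | python/compare/providers/lingpy_wordlist.py | _match_concept
-- ===== SOURCE A (Python) =====
-- from typing import Dict, Iterator, List
--
-- def _match_concept(
--     concept_en: str, concept_index: Dict[str, List[str]]
-- ) -> List[str]:
--     """
--     Match concept_en against concept_index keys using:
--     1. Exact case-insensitive match
--     2. concept_en is a prefix of the key (e.g. "bark" matches "bark of tree")
--     3. key is a prefix of concept_en
--     Returns forms for the best match found.
--     """
--     c = concept_en.lower().strip()
--     # 1. exact
--     if c in concept_index:
--         return concept_index[c]
--     # 2. concept_en is prefix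
--     for key, forms in concept_index.items():
--         if key.startswith(c + " ") or key.startswith(c + "("):
--             return forms
--     # 3. key is prefix of concept_en
--     for key, forms in concept_index.items():
--         if c.startswith(key):
--             return forms
--     return []
-- ===== SOURCE B (Python) =====
-- def _match_concept(concept_en, concept_index):
--     c = concept_en.lower().strip()
--     if c in concept_index:
--         return concept_index[c]
--     fallback = None
--     for key, forms in concept_index.items():
--         if key.startswith(c + " ") or key.startswith(c + "("):
--             return forms
--         if fallback is None and c.startswith(key):
--             fallback = forms
--     return fallback if fallback is not None else []
-- ===== Notes on version B (the rewrite author's own statement) =====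
-- stated objective: alternative
-- what changed: A's two separate scans (prefix-of-key, then key-is-prefix) are fused into one pass that returns eagerly on a phase-2 match and remembers only the first phase-3 candidate in a fallback variable.
import Mathlib
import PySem

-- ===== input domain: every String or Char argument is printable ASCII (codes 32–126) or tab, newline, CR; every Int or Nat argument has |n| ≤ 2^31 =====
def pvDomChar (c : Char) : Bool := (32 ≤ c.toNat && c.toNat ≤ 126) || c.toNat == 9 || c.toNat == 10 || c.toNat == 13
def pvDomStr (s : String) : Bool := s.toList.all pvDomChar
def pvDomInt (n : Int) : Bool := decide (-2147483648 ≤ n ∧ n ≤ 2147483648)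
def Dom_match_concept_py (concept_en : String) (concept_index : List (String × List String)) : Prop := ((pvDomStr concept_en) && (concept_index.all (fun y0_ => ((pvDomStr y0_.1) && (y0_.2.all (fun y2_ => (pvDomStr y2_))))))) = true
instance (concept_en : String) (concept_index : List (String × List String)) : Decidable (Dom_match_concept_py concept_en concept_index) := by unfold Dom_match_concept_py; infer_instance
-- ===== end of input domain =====

-- B fuses A's two scans into one pass (eager return on phase-2, first phase-3 candidate kept as fallback); objective: alternative decomposition, same cost.

-- ===== PORT A =====
-- phase 2 loop of A: first key with key.startswith(c + " ") or key.startswith(c + "(")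
def mcpA_phase2 (c : String) : List (String × List String) → Option (List String)
  | [] => none
  | (key, forms) :: rest =>
    if PySem.Str.startswith key (c ++ " ") || PySem.Str.startswith key (c ++ "(") then some forms
    else mcpA_phase2 c rest

-- phase 3 loop of A: first key with c.startswith(key)
def mcpA_phase3 (c : String) : List (String × List String) → Option (List String)
  | [] => none
  | (key, forms) :: rest =>
    if PySem.Str.startswith c key then some forms
    else mcpA_phase3 c rest

def match_concept_py (concept_en : String) (concept_index : List (String × List String)) : List String :=
  let c := PySem.Str.strip (PySem.Str.lower concept_en)
  match PySem.Dict.get? (PySem.Dict.mk concept_index) c with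
  | some forms => forms
  | none =>
    match mcpA_phase2 c concept_index with
    | some forms => forms
    | none =>
      match mcpA_phase3 c concept_index with
      | some forms => forms
      | none => []

-- ===== PORT B =====
-- B's single fused loop: return eagerly on a phase-2 match, remember first phase-3 candidate
def mcpB_loop (c : String) (fallback : Option (List String)) : List (String × List String) → List String
  | [] => match fallback with | some f => f | none => []
  | (key, forms) :: rest =>
    if PySem.Str.startswith key (c ++ " ") || PySem.Str.startswith key (c ++ "(") then forms
    else mcpB_loop c
      (if fallback.isNone && PySem.Str.startswith c key then some forms else fallback) rest

def match_concept_py_alt (concept_en : String) (concept_index : List (String × List String)) : List String :=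
  let c := PySem.Str.strip (PySem.Str.lower concept_en)
  match PySem.Dict.get? (PySem.Dict.mk concept_index) c with
  | some forms => forms
  | none => mcpB_loop c none concept_index

-- ===== PRECONDITION & SPEC =====
def Spec_match_concept_py (concept_en : String) (concept_index : List (String × List String)) (out : List String) : Prop := out = match_concept_py_alt concept_en concept_index
instance (concept_en : String) (concept_index : List (String × List String)) (out : List String) : Decidable (Spec_match_concept_py concept_en concept_index out) := by unfold Spec_match_concept_py; infer_instance

-- ===== CLAIM (what is proved, stated in full; the proofs are below) =====
def Claim_equal_match_concept_py : Prop := ∀ (concept_en : String) (concept_index : List (String × List String)), Dom_match_concept_py concept_en concept_index → Spec_match_concept_py concept_en concept_index (match_concept_py concept_en concept_index)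

-- ===== LEMMAS AND PROOFS =====

-- ===== VERDICT (by name: the statement is the Claim_ definition above) =====
theorem mcpB_loop_eq (c : String) (l : List (String × List String)) (acc : Option (List String)) :
    mcpB_loop c acc l =
      match mcpA_phase2 c l with
      | some f => f
      | none =>
        match acc with
        | some a => a
        | none => match mcpA_phase3 c l with | some f => f | none => [] := by
  induction l generalizing acc with
  | nil => cases acc <;> simp [mcpB_loop, mcpA_phase2, mcpA_phase3]
  | cons hd tl ih =>
    obtain ⟨key, forms⟩ := hd
    by_cases h2 : (PySem.Chars.startswith key.toList (c.toList ++ [' ']) = true ∨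
        PySem.Chars.startswith key.toList (c.toList ++ ['(']) = true)
    · simp [mcpB_loop, mcpA_phase2, h2]
    · cases acc with
      | some a => simp [mcpB_loop, mcpA_phase2, h2, ih]
      | none =>
        by_cases h3 : PySem.Chars.startswith c.toList key.toList = true
        · simp [mcpB_loop, mcpA_phase2, mcpA_phase3, h2, h3, ih]
        · simp [mcpB_loop, mcpA_phase2, mcpA_phase3, h2, h3, ih]

theorem match_concept_py_spec : Claim_equal_match_concept_py := by
  intro concept_en concept_index _
  unfold Spec_match_concept_py match_concept_py match_concept_py_alt
  cases h : (PySem.Dict.mk concept_index).get? (PySem.Str.strip (PySem.Str.lower concept_en)) with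
  | some forms => simp only [h]
  | none =>
    simp only [h, mcpB_loop_eq]
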